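-- pv_equiv track=rewrite | github.com/alimobrem/pulse-agent | sre_agent/layout_engine.py | _pack_group
-- ===== SOURCE A (Python) =====
-- def _pack_group(
--     items: list[tuple[int, str, int, int]],
--     positions: dict[int, dict],
--     start_y: int,
-- ) -> int:
--     """Pack a group of items into consecutive rows, respecting widths."""
--     y = start_y
--     x = 0
--     row_h = 0
--
--     # Sort by width descending for better bin-packing
--     sorted_items = sorted(items, key=lambda t: -t[2])
--
--     for orig_idx, _kind, w, h in sorted_items:
--         if x + w > 4:
--             y += row_h
--             x = 0
--             row_h = 0
--         positions[orig_idx] = {"x": x, "y": y, "w": w, "h": h}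
--         row_h = max(row_h, h)
--         x += w
--
--     if row_h > 0:
--         y += row_h
--
--     return y
-- ===== SOURCE B (Python) =====
-- def _pack_group(
--     items: list[tuple[int, str, int, int]],
--     positions: dict[int, dict],
--     start_y: int,
-- ) -> int:
--     """Two-pass layout: first partition width-desc-sorted items into rows,
--     then lay out each row and advance y by the row's max height."""
--     # Pass 1: partition into rows.
--     rows = []
--     cur = []
--     x = 0
--     for it in sorted(items, key=lambda t: -t[2]):
--         if x + it[2] > 4:
--             rows.append(cur)
--             cur = [it]
--             x = it[2]
--         else:
--             cur.append(it)
--             x += it[2]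
--     if cur:
--         rows.append(cur)
--     # Pass 2: lay out row by row.
--     y = start_y
--     for row in rows:
--         rx = 0
--         for orig_idx, _kind, w, h in row:
--             positions[orig_idx] = {"x": rx, "y": y, "w": w, "h": h}
--             rx += w
--         y += max([0] + [h for *_, h in row])
--     return y
-- ===== Notes on version B (the rewrite author's own statement) =====
-- stated objective: alternative
-- what changed: Replaces A's single fused loop carrying (y, x, row_h) with a two-pass decomposition: first partition the width-desc-sorted items into explicit rows, then lay out each row and advance y by that row's max height.
import Mathlib
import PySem

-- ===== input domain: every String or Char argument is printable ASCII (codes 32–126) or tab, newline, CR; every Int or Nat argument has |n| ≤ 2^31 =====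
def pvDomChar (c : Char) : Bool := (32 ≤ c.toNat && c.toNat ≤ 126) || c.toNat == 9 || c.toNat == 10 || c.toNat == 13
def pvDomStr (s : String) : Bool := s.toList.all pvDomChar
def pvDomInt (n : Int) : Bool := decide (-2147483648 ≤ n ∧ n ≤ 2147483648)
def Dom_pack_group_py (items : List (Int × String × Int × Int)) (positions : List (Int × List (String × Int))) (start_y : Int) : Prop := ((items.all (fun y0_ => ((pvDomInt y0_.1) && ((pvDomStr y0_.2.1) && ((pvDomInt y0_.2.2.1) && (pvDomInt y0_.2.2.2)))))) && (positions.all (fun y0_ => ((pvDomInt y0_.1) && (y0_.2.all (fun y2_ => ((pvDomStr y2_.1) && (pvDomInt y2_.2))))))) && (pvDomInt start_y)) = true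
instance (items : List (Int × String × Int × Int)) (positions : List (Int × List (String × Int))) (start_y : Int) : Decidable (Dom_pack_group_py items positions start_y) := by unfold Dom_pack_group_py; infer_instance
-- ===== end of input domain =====

-- B replaces A's fused loop with a two-pass decomposition (partition into rows, then lay out rows);
-- the equivalence proved here is about the RETURN value only (both Pythons also mutate `positions` identically).

-- ===== PORT A =====
-- one fused loop over the sorted items carrying (y, x, row_h, positions)
def pack_group_py (items : List (Int × String × Int × Int)) (positions : List (Int × List (String × Int))) (start_y : Int) : Int :=
  let sorted_items := PySem.List.sorted items (fun t => -t.2.2.1) false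
  let st := sorted_items.foldl
    (fun (s : Int × Int × Int × PySem.Dict Int (List (String × Int))) it =>
      let y := s.1; let x := s.2.1; let row_h := s.2.2.1; let pos := s.2.2.2
      -- if x + w > 4: y += row_h; x = 0; row_h = 0
      let y := if x + it.2.2.1 > 4 then y + row_h else y
      let row_h := if x + it.2.2.1 > 4 then 0 else row_h
      let x := if x + it.2.2.1 > 4 then 0 else x
      -- positions[orig_idx] = {...}; row_h = max(row_h, h); x += w
      (y, x + it.2.2.1, max row_h it.2.2.2,
       pos.insert it.1 [("x", x), ("y", y), ("w", it.2.2.1), ("h", it.2.2.2)]))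
    (start_y, 0, 0, PySem.Dict.ofList positions)
  if st.2.2.1 > 0 then st.1 + st.2.2.1 else st.1

-- ===== PORT B =====
-- pass 1 of Source B: partition the sorted items into rows, state (rows, cur, x)
def pgRowsStep (s : List (List (Int × String × Int × Int)) × List (Int × String × Int × Int) × Int)
    (it : Int × String × Int × Int) :
    List (List (Int × String × Int × Int)) × List (Int × String × Int × Int) × Int :=
  if s.2.2 + it.2.2.1 > 4 then (s.1 ++ [s.2.1], [it], it.2.2.1)
  else (s.1, s.2.1 ++ [it], s.2.2 + it.2.2.1)

-- pass 2 of Source B: lay out one row (writing positions left to right), then advance y by the row max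
def pgLayoutStep (s : Int × PySem.Dict Int (List (String × Int))) (row : List (Int × String × Int × Int)) :
    Int × PySem.Dict Int (List (String × Int)) :=
  let pr := row.foldl
    (fun (t : PySem.Dict Int (List (String × Int)) × Int) it =>
      (t.1.insert it.1 [("x", t.2), ("y", s.1), ("w", it.2.2.1), ("h", it.2.2.2)], t.2 + it.2.2.1))
    (s.2, 0)
  (s.1 + (row.map (fun it => it.2.2.2)).foldl max 0, pr.1)

def pack_group_py_alt (items : List (Int × String × Int × Int)) (positions : List (Int × List (String × Int))) (start_y : Int) : Int :=
  let p := (PySem.List.sorted items (fun t => -t.2.2.1) false).foldl pgRowsStep ([], [], 0)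
  let rows := if p.2.1.isEmpty then p.1 else p.1 ++ [p.2.1]
  (rows.foldl pgLayoutStep (start_y, PySem.Dict.ofList positions)).1

-- ===== PRECONDITION & SPEC =====
def Spec_pack_group_py (items : List (Int × String × Int × Int)) (positions : List (Int × List (String × Int))) (start_y : Int) (out : Int) : Prop := out = pack_group_py_alt items positions start_y
instance (items : List (Int × String × Int × Int)) (positions : List (Int × List (String × Int))) (start_y : Int) (out : Int) : Decidable (Spec_pack_group_py items positions start_y out) := by unfold Spec_pack_group_py; infer_instance

-- ===== CLAIM (what is proved, stated in full; the proofs are below) =====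
def Claim_equal_pack_group_py : Prop := ∀ (items : List (Int × String × Int × Int)) (positions : List (Int × List (String × Int))) (start_y : Int), Dom_pack_group_py items positions start_y → Spec_pack_group_py items positions start_y (pack_group_py items positions start_y)

-- ===== LEMMAS AND PROOFS =====

-- abstract "remaining contribution to y" of A's loop from state (x, row_h)
def pgS : List (Int × String × Int × Int) → Int → Int → Int
  | [], _, rh => rh
  | it :: l, x, rh =>
      if x + it.2.2.1 > 4 then rh + pgS l it.2.2.1 (max 0 it.2.2.2)
      else pgS l (x + it.2.2.1) (max rh it.2.2.2)

-- max-height of a row (0-based)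
def pgH (r : List (Int × String × Int × Int)) : Int := (r.map (fun it => it.2.2.2)).foldl max 0

-- A's loop from any state computes y + pgS l x rh
lemma pgA_char (l : List (Int × String × Int × Int)) (y x rh : Int)
    (pos : PySem.Dict Int (List (String × Int))) (h : 0 ≤ rh) :
    (let st := l.foldl
        (fun (s : Int × Int × Int × PySem.Dict Int (List (String × Int))) it =>
          let y := s.1; let x := s.2.1; let row_h := s.2.2.1; let pos := s.2.2.2
          let y := if x + it.2.2.1 > 4 then y + row_h else y
          let row_h := if x + it.2.2.1 > 4 then 0 else row_h
          let x := if x + it.2.2.1 > 4 then 0 else x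
          (y, x + it.2.2.1, max row_h it.2.2.2,
           pos.insert it.1 [("x", x), ("y", y), ("w", it.2.2.1), ("h", it.2.2.2)]))
        (y, x, rh, pos)
     if st.2.2.1 > 0 then st.1 + st.2.2.1 else st.1) = y + pgS l x rh := by
  induction l generalizing y x rh pos with
  | nil =>
      simp only [List.foldl_nil, pgS]
      split <;> omega
  | cons it l ih =>
      simp only [List.foldl_cons, pgS]
      by_cases hc : x + it.2.2.1 > 4
      · simp only [if_pos hc]
        rw [ih (y + rh) (0 + it.2.2.1) (max 0 it.2.2.2) _ (le_max_left _ _)]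
        simp [add_assoc]
      · simp only [if_neg hc]
        rw [ih y (x + it.2.2.1) (max rh it.2.2.2) _ (le_trans h (le_max_left _ _))]

-- B's layout pass: the y component is y plus the sum of row maxima
lemma pgB_layout (rows : List (List (Int × String × Int × Int))) (y : Int)
    (pos : PySem.Dict Int (List (String × Int))) :
    (rows.foldl pgLayoutStep (y, pos)).1 = y + (rows.map pgH).sum := by
  induction rows generalizing y pos with
  | nil => simp
  | cons r rows ih =>
      simp only [List.foldl_cons, List.map_cons, List.sum_cons, pgLayoutStep, pgH]
      rw [ih]
      ring

lemma pgH_append_one (r : List (Int × String × Int × Int)) (it : Int × String × Int × Int) :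
    pgH (r ++ [it]) = max (pgH r) it.2.2.2 := by
  simp [pgH]

-- B's partition pass: the total of row maxima over the finished rows equals
-- the closed rows' total plus pgS of the remaining items from the current state
lemma pgB_part (l : List (Int × String × Int × Int))
    (rows : List (List (Int × String × Int × Int))) (cur : List (Int × String × Int × Int)) (x : Int) :
    (let p := l.foldl pgRowsStep (rows, cur, x)
     ((if p.2.1.isEmpty then p.1 else p.1 ++ [p.2.1]).map pgH).sum)
      = (rows.map pgH).sum + pgS l x (pgH cur) := by
  induction l generalizing rows cur x with
  | nil =>
      simp only [List.foldl_nil, pgS]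
      by_cases hc : cur.isEmpty
      · simp [List.isEmpty_iff.mp hc, pgH]
      · simp [hc]
  | cons it l ih =>
      simp only [List.foldl_cons, pgRowsStep, pgS]
      by_cases hc : x + it.2.2.1 > 4
      · simp only [if_pos hc]
        rw [ih (rows ++ [cur]) [it] it.2.2.1]
        have h1 : pgH [it] = max 0 it.2.2.2 := by simp [pgH]
        simp [h1, add_assoc]
      · simp only [if_neg hc]
        rw [ih rows (cur ++ [it]) (x + it.2.2.1), pgH_append_one]

-- ===== VERDICT (by name: the statement is the Claim_ definition above) =====
theorem pack_group_py_spec : Claim_equal_pack_group_py := by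
  intro items positions start_y _
  unfold Spec_pack_group_py pack_group_py pack_group_py_alt
  rw [pgB_layout]
  have hA := pgA_char (PySem.List.sorted items (fun t => -t.2.2.1) false) start_y 0 0
      (PySem.Dict.ofList positions) le_rfl
  have hB := pgB_part (PySem.List.sorted items (fun t => -t.2.2.1) false) [] [] 0
  simp only at hA hB
  rw [hA, hB]
  simp [pgH]
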